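-- pv_equiv track=rewrite | github.com/ballin-23/advent_of_code | 2015/day_1/solution.py | calculate_floors
-- ===== SOURCE A (Python) =====
-- def calculate_floors(arr):
--     sum = 0
--     for line in arr:
--         for char in line:
--             if char == "(":
--                 sum += 1
--             else:
--                 sum -= 1
--     return sum
-- ===== SOURCE B (Python) =====
-- def calculate_floors(arr):
--     freq = {}
--     for line in arr:
--         for ch in line:
--             freq[ch] = freq.get(ch, 0) + 1
--     floor = 0
--     for ch, n in freq.items():
--         floor += n if ch == "(" else -n
--     return floor
-- ===== Notes on version B (the rewrite author's own statement) =====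
-- stated objective: alternative
-- what changed: Builds a character-frequency dictionary in one phase, then computes the floor in a second phase as a signed sum over the DISTINCT characters of the histogram, instead of branching and adjusting a running sum per character.
import Mathlib
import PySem

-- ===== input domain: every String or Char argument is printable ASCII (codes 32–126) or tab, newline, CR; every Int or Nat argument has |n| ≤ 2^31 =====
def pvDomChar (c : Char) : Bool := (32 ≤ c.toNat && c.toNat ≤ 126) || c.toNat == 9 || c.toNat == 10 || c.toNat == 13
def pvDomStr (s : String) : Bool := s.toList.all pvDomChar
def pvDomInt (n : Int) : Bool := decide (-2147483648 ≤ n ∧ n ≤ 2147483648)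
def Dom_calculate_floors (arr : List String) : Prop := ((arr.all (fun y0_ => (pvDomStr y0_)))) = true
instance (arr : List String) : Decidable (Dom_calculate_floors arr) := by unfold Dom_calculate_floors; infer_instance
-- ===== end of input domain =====

-- B builds a character-frequency dictionary first and then derives the floor as a signed sum
-- over the distinct characters of that histogram; objective: alternative (same cost, different structure).

-- ===== PORT A =====
def calculate_floors (arr : List String) : Int :=
  arr.foldl (fun sum line =>
    line.toList.foldl (fun s c => if c == '(' then s + 1 else s - 1) sum) 0

-- ===== PORT B =====
def calculate_floors_alt (arr : List String) : Int :=
  let freq : PySem.Dict Char Int :=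
    arr.foldl (fun freq line =>
      line.toList.foldl (fun freq ch => freq.insert ch (freq.getD ch 0 + 1)) freq)
      PySem.Dict.empty
  freq.items.foldl (fun floor p => floor + (if p.1 == '(' then p.2 else -p.2)) 0

-- ===== PRECONDITION & SPEC =====
def Spec_calculate_floors (arr : List String) (out : Int) : Prop := out = calculate_floors_alt arr
instance (arr : List String) (out : Int) : Decidable (Spec_calculate_floors arr out) := by unfold Spec_calculate_floors; infer_instance

-- ===== CLAIM (what is proved, stated in full; the proofs are below) =====
def Claim_equal_calculate_floors : Prop := ∀ (arr : List String), Dom_calculate_floors arr → Spec_calculate_floors arr (calculate_floors arr)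

-- ===== LEMMAS AND PROOFS =====

-- a fold over lines of inner char-folds is a fold over the concatenated characters
theorem pv_flat {σ : Type} (g : σ → Char → σ) (arr : List String) : ∀ d : σ,
    arr.foldl (fun d line => line.toList.foldl g d) d
      = (arr.flatMap String.toList).foldl g d := by
  induction arr with
  | nil => intro d; simp
  | cons h t ih => intro d; simp [List.foldl_append, ih]

-- A's per-character loop in closed form
theorem pv_line (cs : List Char) : ∀ s : Int,
    cs.foldl (fun s c => if c == '(' then s + 1 else s - 1) s
      = s + 2 * (cs.count '(' : Int) - (cs.length : Int) := by
  induction cs with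
  | nil => intro s; simp
  | cons h t ih =>
    intro s
    rw [List.foldl_cons, ih, List.count_cons]
    by_cases hc : h = '('
    · rw [if_pos (by simp [hc]), if_pos (by simp [hc])]; push_cast [List.length_cons]; ring
    · rw [if_neg (by simp [hc]), if_neg (by simp [hc])]; push_cast [List.length_cons]; ring

-- B's second loop is a sum of the mapped items
theorem pv_foldl_add (l : List (Char × Int)) : ∀ s : Int,
    l.foldl (fun floor p => floor + (if p.1 == '(' then p.2 else -p.2)) s
      = s + (l.map (fun p => if p.1 == '(' then p.2 else -p.2)).sum := by
  induction l with
  | nil => intro s; simp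
  | cons h t ih => intro s; rw [List.foldl_cons, ih]; simp; ring

-- signed sum of counts over the distinct characters of cs = 2*count '(' - length
theorem pv_signed_sum (cs S : List Char) (hnd : S.Nodup) (hmem : ∀ x, x ∈ S ↔ x ∈ cs) :
    (S.map (fun k => if k == '(' then (cs.count k : Int) else -(cs.count k : Int))).sum
      = 2 * (cs.count '(' : Int) - (cs.length : Int) := by
  rw [← List.sum_toFinset _ hnd]
  have hfs : S.toFinset = cs.toFinset := by
    ext a; simp [List.mem_toFinset, hmem a]
  rw [hfs]
  have hpt : ∀ a : Char, (if a == '(' then (cs.count a : Int) else -(cs.count a : Int))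
      = (if a = '(' then 2 * (cs.count a : Int) else 0) - (cs.count a : Int) := by
    intro a; by_cases h : a = '(' <;> simp [h]; ring
  calc ∑ a ∈ cs.toFinset, (if a == '(' then (cs.count a : Int) else -(cs.count a : Int))
      = ∑ a ∈ cs.toFinset, ((if a = '(' then 2 * (cs.count a : Int) else 0) - (cs.count a : Int)) := by
        exact Finset.sum_congr rfl (fun a _ => hpt a)
    _ = (∑ a ∈ cs.toFinset, (if a = '(' then 2 * (cs.count a : Int) else 0))
          - ∑ a ∈ cs.toFinset, (cs.count a : Int) := Finset.sum_sub_distrib _ _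
    _ = 2 * (cs.count '(' : Int) - (cs.length : Int) := by
        rw [Finset.sum_ite_eq' cs.toFinset '(' (fun a => 2 * (cs.count a : Int))]
        have hlen : ∑ a ∈ cs.toFinset, (cs.count a : Int) = (cs.length : Int) := by
          rw [← Nat.cast_sum]
          exact_mod_cast congrArg (Nat.cast (R := Int)) (List.sum_toFinset_count_eq_length cs)
        rw [hlen]
        by_cases h : '(' ∈ cs
        · rw [if_pos (List.mem_toFinset.mpr h)]
        · rw [if_neg (fun hc => h (List.mem_toFinset.mp hc)),
            List.count_eq_zero.mpr h]
          simp

-- ===== VERDICT (by name: the statement is the Claim_ definition above) =====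
theorem calculate_floors_spec : Claim_equal_calculate_floors := by
  intro arr _
  unfold Spec_calculate_floors calculate_floors calculate_floors_alt
  rw [pv_flat, pv_flat, PySem.Dict.foldl_insert_getD_add_one_eq_counter,
    pv_foldl_add, PySem.Dict.items_counter, pv_line]
  rw [List.map_map]
  simp only [Function.comp_def]
  rw [pv_signed_sum (arr.flatMap String.toList) _ (PySem.Set.nodup_ofList _)
    (fun x => PySem.Set.mem_ofList _ x)]
  ring
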